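-- pv_equiv track=rewrite | github.com/IBM/few-shot-schema-linking | dec_sl/processing/postprocess.py | group_column_labels_by_table
-- ===== SOURCE A (Python) =====
-- from typing import Dict, List, Tuple, Union
--
-- def group_column_labels_by_table(
--     column_labels: List[int], schema_items: List[Dict]
-- ) -> List[List[int]]:
--     grouped_column_labels = []
--     column_index = 0
--
--     for table in schema_items:
--         column_count = len(table["column_names"])
--         grouped_column_labels.append(
--             column_labels[column_index : column_index + column_count]
--         )
--         column_index += column_count
--
--     return grouped_column_labels
-- ===== SOURCE B (Python) =====
-- def group_column_labels_by_table(column_labels, schema_items):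
--     if not schema_items:
--         return []
--     n = len(schema_items[0]["column_names"])
--     return [column_labels[:n]] + group_column_labels_by_table(
--         column_labels[n:], schema_items[1:]
--     )
-- ===== Notes on version B (the rewrite author's own statement) =====
-- stated objective: alternative
-- what changed: B is a structural recursion that consumes the label list itself: it peels off the first table's chunk from the front of the remaining labels and recurses on the rest, instead of A's loop that keeps an accumulator list and a running absolute column index into the original list.
import Mathlib
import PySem

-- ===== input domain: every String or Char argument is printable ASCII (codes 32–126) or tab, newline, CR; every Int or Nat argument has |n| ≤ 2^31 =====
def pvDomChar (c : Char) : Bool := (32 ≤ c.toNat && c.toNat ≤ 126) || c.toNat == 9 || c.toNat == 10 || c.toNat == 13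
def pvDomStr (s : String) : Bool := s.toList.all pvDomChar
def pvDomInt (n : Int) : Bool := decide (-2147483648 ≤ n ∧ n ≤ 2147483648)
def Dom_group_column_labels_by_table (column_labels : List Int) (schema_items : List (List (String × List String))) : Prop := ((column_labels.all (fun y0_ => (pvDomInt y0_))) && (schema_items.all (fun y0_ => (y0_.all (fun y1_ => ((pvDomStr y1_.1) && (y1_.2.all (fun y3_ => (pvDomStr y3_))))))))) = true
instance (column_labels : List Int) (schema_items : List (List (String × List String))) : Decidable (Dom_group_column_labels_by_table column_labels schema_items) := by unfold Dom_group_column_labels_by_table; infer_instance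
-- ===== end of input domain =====

-- B replaces A's loop (accumulator list + running absolute column index) by a structural
-- recursion that consumes the label list itself (objective: alternative, same cost).

-- number of columns of one table: len(table["column_names"]); shared by both ports
-- (dict lookup = first match; getD [] is unreachable under Pre_)
def pvColCount (table : List (String × List String)) : Int :=
  (((table.lookup "column_names").getD []).length : Int)

-- ===== PORT A =====
def group_column_labels_by_table (column_labels : List Int) (schema_items : List (List (String × List String))) : List (List Int) :=
  (schema_items.foldl
    (fun (st : List (List Int) × Int) table =>
      let column_count := pvColCount table
      (st.1 ++ [PySem.List.slice column_labels (some st.2) (some (st.2 + column_count))],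
       st.2 + column_count))
    ([], 0)).1

-- ===== PORT B =====
def group_column_labels_by_table_alt (column_labels : List Int) (schema_items : List (List (String × List String))) : List (List Int) :=
  match schema_items with
  | [] => []
  | t :: ts =>
      let n := pvColCount t
      [PySem.List.slice column_labels none (some n)] ++
        group_column_labels_by_table_alt (PySem.List.slice column_labels (some n) none) ts

-- ===== PRECONDITION & SPEC =====
-- Pre_ excludes exactly the inputs where some table lacks the key "column_names",
-- on which the Python A (and B) raise KeyError.
def Pre_group_column_labels_by_table (column_labels : List Int) (schema_items : List (List (String × List String))) : Prop :=
  schema_items.all (fun t => (t.lookup "column_names").isSome) = true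
instance (column_labels : List Int) (schema_items : List (List (String × List String))) : Decidable (Pre_group_column_labels_by_table column_labels schema_items) := by unfold Pre_group_column_labels_by_table; infer_instance

def pvWitness_group_column_labels_by_table : List Int × (List (List (String × List String))) :=
  ([1, 2, 3], [[("column_names", ["a", "b"])], [("column_names", ["c"])]])

def Spec_group_column_labels_by_table (column_labels : List Int) (schema_items : List (List (String × List String))) (out : List (List Int)) : Prop := out = group_column_labels_by_table_alt column_labels schema_items
instance (column_labels : List Int) (schema_items : List (List (String × List String))) (out : List (List Int)) : Decidable (Spec_group_column_labels_by_table column_labels schema_items out) := by unfold Spec_group_column_labels_by_table; infer_instance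

-- ===== CLAIM (what is proved, stated in full; the proofs are below) =====
def Claim_equal_group_column_labels_by_table : Prop := ∀ (column_labels : List Int) (schema_items : List (List (String × List String))), Dom_group_column_labels_by_table column_labels schema_items → Pre_group_column_labels_by_table column_labels schema_items → Spec_group_column_labels_by_table column_labels schema_items (group_column_labels_by_table column_labels schema_items)

-- ===== LEMMAS AND PROOFS =====

-- the list of slices A produces, in direct recursive form
def pvGoA (cl : List Int) : List (List (String × List String)) → Int → List (List Int)
  | [], _ => []
  | t :: ts, i =>
      PySem.List.slice cl (some i) (some (i + pvColCount t)) :: pvGoA cl ts (i + pvColCount t)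

theorem pvAfold (cl : List Int) : ∀ (si : List (List (String × List String))) (acc : List (List Int)) (i : Int),
    (si.foldl
      (fun (st : List (List Int) × Int) table =>
        let c := pvColCount table
        (st.1 ++ [PySem.List.slice cl (some st.2) (some (st.2 + c))], st.2 + c))
      (acc, i)).1 = acc ++ pvGoA cl si i := by
  intro si
  induction si with
  | nil => intro acc i; simp [pvGoA]
  | cons t ts ih =>
      intro acc i
      simp only [List.foldl_cons, pvGoA]
      rw [ih]
      simp

-- pvColCount is a natural-number cast
theorem pvColCount_cast (t : List (String × List String)) :
    pvColCount t = ((((t.lookup "column_names").getD []).length : Nat) : Int) := rfl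

-- A's recursive form at a nonnegative absolute index j equals B's recursion on the
-- j-dropped label list
theorem pvGoA_eq_alt (cl : List Int) : ∀ (si : List (List (String × List String))) (j : Nat),
    pvGoA cl si (j : Int) = group_column_labels_by_table_alt (cl.drop j) si := by
  intro si
  induction si with
  | nil => intro j; simp [pvGoA, group_column_labels_by_table_alt]
  | cons t ts ih =>
      intro j
      unfold pvGoA group_column_labels_by_table_alt
      rw [pvColCount_cast]
      dsimp only
      rw [PySem.List.slice_natCast_add, PySem.List.slice_to_natCast, PySem.List.slice_from_natCast]
      rw [List.drop_drop]
      have : ((j : Int) + (((t.lookup "column_names").getD []).length : Int))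
          = (((((t.lookup "column_names").getD []).length) + j : Nat) : Int) := by push_cast; ring
      rw [this, ih]
      simp [Nat.add_comm]

-- ===== VERDICT (by name: the statement is the Claim_ definition above) =====
theorem group_column_labels_by_table_spec : Claim_equal_group_column_labels_by_table := by
  intro cl si _ _
  unfold Spec_group_column_labels_by_table group_column_labels_by_table
  rw [pvAfold cl si [] 0]
  have h := pvGoA_eq_alt cl si 0
  simpa using h
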